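-- pv_equiv track=rewrite | github.com/meiiie/wiii | maritime-ai-service/app/services/input_processor_context_runtime.py | _history_quality_score
-- ===== SOURCE A (Python) =====
-- def _history_quality_score(history_items: list[dict[str, str]]) -> tuple[int, int, int]:
--     roles = {str(item.get("role") or "").strip().lower() for item in history_items}
--     assistant_count = sum(
--         1
--         for item in history_items
--         if str(item.get("role") or "").strip().lower() == "assistant"
--     )
--     return (
--         len(history_items),
--         assistant_count,
--         len(roles),
--     )
-- ===== SOURCE B (Python) =====
-- def _history_quality_score(history_items: list[dict[str, str]]) -> tuple[int, int, int]:
--     roles = sorted(str(item.get("role") or "").strip().lower() for item in history_items)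
--     assistant_count = 0
--     distinct = 0
--     prev = None
--     for role in roles:
--         if role != prev:
--             distinct += 1
--             prev = role
--         if role == "assistant":
--             assistant_count += 1
--     return (len(history_items), assistant_count, distinct)
-- ===== Notes on version B (the rewrite author's own statement) =====
-- stated objective: alternative
-- what changed: Replaces A's role-set comprehension plus a separate assistant-summing pass with sort-then-scan: B sorts the normalized roles once and a single scan of the sorted list counts run starts (distinct roles) and 'assistant' occurrences.
import Mathlib
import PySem

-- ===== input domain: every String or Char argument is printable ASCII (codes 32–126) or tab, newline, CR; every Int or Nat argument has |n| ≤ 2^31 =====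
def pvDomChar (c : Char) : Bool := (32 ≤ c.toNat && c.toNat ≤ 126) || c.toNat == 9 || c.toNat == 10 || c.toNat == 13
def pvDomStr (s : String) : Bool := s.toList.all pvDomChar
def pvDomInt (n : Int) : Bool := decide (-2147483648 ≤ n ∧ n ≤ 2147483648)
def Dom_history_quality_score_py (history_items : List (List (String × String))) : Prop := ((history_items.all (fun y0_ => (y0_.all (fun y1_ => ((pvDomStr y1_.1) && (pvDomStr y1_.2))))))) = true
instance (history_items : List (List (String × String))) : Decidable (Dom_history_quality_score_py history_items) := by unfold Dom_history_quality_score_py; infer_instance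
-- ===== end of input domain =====

-- B replaces A's role-set comprehension + separate assistant-summing pass by sorting the
-- normalized roles once and counting run starts (distinct roles) and "assistant" hits in one
-- scan of the sorted list (objective: alternative; not claimed faster).

-- str(item.get("role") or "").strip().lower()  (get→None and get→"" both normalize through "")
def pvNormRole (item : List (String × String)) : String :=
  PySem.Str.lower (PySem.Str.strip (((PySem.Dict.mk item).get? "role").getD ""))

-- ===== PORT A =====
def history_quality_score_py (history_items : List (List (String × String))) : Int × Int × Int :=
  let roles : PySem.Set String := PySem.Set.ofList (history_items.map pvNormRole)
  let assistant_count : Int :=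
    history_items.foldl (fun acc item => if pvNormRole item == "assistant" then acc + 1 else acc) 0
  ((history_items.length : Int), assistant_count, PySem.Set.len roles)

-- ===== PORT B =====
-- one loop iteration of B over the sorted roles: state = (assistant_count, distinct, prev)
def pvBStep (s : Int × Int × Option String) (role : String) : Int × Int × Option String :=
  let s1 := if s.2.2 ≠ some role then (s.2.1 + 1, some role) else (s.2.1, s.2.2)
  (if role == "assistant" then s.1 + 1 else s.1, s1.1, s1.2)

def history_quality_score_py_alt (history_items : List (List (String × String))) : Int × Int × Int :=
  let roles := PySem.List.sorted (history_items.map pvNormRole) (fun r => r) false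
  let s := roles.foldl pvBStep (0, 0, none)
  ((history_items.length : Int), s.1, s.2.1)

-- ===== PRECONDITION & SPEC =====
def Spec_history_quality_score_py (history_items : List (List (String × String))) (out : Int × Int × Int) : Prop := out = history_quality_score_py_alt history_items
instance (history_items : List (List (String × String))) (out : Int × Int × Int) : Decidable (Spec_history_quality_score_py history_items out) := by unfold Spec_history_quality_score_py; infer_instance

-- ===== CLAIM (what is proved, stated in full; the proofs are below) =====
def Claim_equal_history_quality_score_py : Prop := ∀ (history_items : List (List (String × String))), Dom_history_quality_score_py history_items → Spec_history_quality_score_py history_items (history_quality_score_py history_items)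

-- ===== LEMMAS AND PROOFS =====

-- what B's scan adds to `distinct`: one per element that differs from its predecessor
def pvRunCount : Option String → List String → Int
  | _, [] => 0
  | prev, x :: xs => (if prev ≠ some x then 1 else 0) + pvRunCount (some x) xs

-- value of `prev` after the scan
def pvLastP : Option String → List String → Option String
  | prev, [] => prev
  | _, x :: xs => pvLastP (some x) xs

-- B's fold splits into the assistant count and the run count
theorem pv_foldB (l : List String) : ∀ (ac dc : Int) (prev : Option String),
    l.foldl pvBStep (ac, dc, prev)
      = (ac + (l.count "assistant" : Int), dc + pvRunCount prev l, pvLastP prev l) := by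
  induction l with
  | nil => intro ac dc prev; simp [pvRunCount, pvLastP]
  | cons x xs ih =>
    intro ac dc prev
    simp only [List.foldl_cons, pvBStep, pvRunCount, pvLastP, List.count_cons]
    rcases eq_or_ne x "assistant" with h2 | h2
    · subst h2
      by_cases h1 : prev = some "assistant" <;> · simp [h1, ih]; ring_nf; try exact ⟨trivial, trivial⟩
    · by_cases h1 : prev = some x
      · simp [h1, h2, ih]
      · simp [h1, h2, ih]; ring_nf

-- A's filtered sum is the count of "assistant" among the normalized roles
theorem pv_assistant_count (history_items : List (List (String × String))) (acc : Int) :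
    history_items.foldl (fun acc item => if pvNormRole item == "assistant" then acc + 1 else acc) acc
      = acc + ((history_items.map pvNormRole).count "assistant" : Int) := by
  induction history_items generalizing acc with
  | nil => simp
  | cons x xs ih =>
    simp only [List.foldl_cons, List.map_cons, List.count_cons, ih]
    by_cases h : pvNormRole x = "assistant" <;> simp [h] <;> ring

-- card (insert x s) in terms of card (erase x s), whether or not x ∈ s
theorem pv_card_insert (x : String) (s : Finset String) :
    (insert x s).card = (s.erase x).card + 1 := by
  by_cases h : x ∈ s
  · rw [Finset.insert_eq_self.mpr h, Finset.card_erase_of_mem h]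
    have := Finset.card_pos.mpr ⟨x, h⟩
    omega
  · rw [Finset.card_insert_of_notMem h, Finset.erase_eq_of_notMem h]

-- on a ≤-sorted list whose elements all dominate p, the run count seen from prev = p
-- is the number of distinct elements other than p
theorem pv_runCount_some (l : List String) :
    ∀ p : String, l.Pairwise (· ≤ ·) → (∀ y ∈ l, p ≤ y) →
    pvRunCount (some p) l = ((l.toFinset.erase p).card : Int) := by
  induction l with
  | nil => intro p _ _; simp [pvRunCount]
  | cons x xs ih =>
    intro p hs hp
    have hs' := (List.pairwise_cons.mp hs).2
    have hxle := (List.pairwise_cons.mp hs).1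
    by_cases hx : x = p
    · subst hx
      have h0 : pvRunCount (some x) (x :: xs) = pvRunCount (some x) xs := by
        simp [pvRunCount]
      rw [h0, ih x hs' hxle]
      congr 2
      simp [List.toFinset_cons, Finset.erase_insert_eq_erase]
    · have hpx : p ≤ x := hp x (by simp)
      have hpnot : p ∉ xs := fun hmem => hx (le_antisymm (hxle p hmem) hpx)
      have hpx' : p ≠ x := fun h => hx h.symm
      have h1 : pvRunCount (some p) (x :: xs) = 1 + pvRunCount (some x) xs := by
        simp [pvRunCount, hpx']
      rw [h1, ih x hs' hxle]
      have herase : ((x :: xs).toFinset).erase p = insert x xs.toFinset := by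
        rw [List.toFinset_cons, Finset.erase_eq_of_notMem]
        simp [hpx', hpnot]
      rw [herase, pv_card_insert]
      push_cast
      ring

-- run count from prev = None on a ≤-sorted list is the number of distinct elements
theorem pv_runCount_none (l : List String) (hs : l.Pairwise (· ≤ ·)) :
    pvRunCount none l = (l.toFinset.card : Int) := by
  cases l with
  | nil => simp [pvRunCount]
  | cons x xs =>
    have hs' := (List.pairwise_cons.mp hs).2
    have hxle := (List.pairwise_cons.mp hs).1
    have h1 : pvRunCount none (x :: xs) = 1 + pvRunCount (some x) xs := by
      simp [pvRunCount]
    rw [h1, pv_runCount_some xs x hs' hxle, List.toFinset_cons, pv_card_insert]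
    push_cast
    ring

-- A's set size is the number of distinct elements
theorem pv_set_len (xs : List String) :
    PySem.Set.len (PySem.Set.ofList xs) = (xs.toFinset.card : Int) := by
  have hnd := PySem.Set.nodup_ofList (α := String) xs
  have hfin : (PySem.Set.ofList xs).toFinset = xs.toFinset := by
    ext y; simp [PySem.Set.mem_ofList]
  have hlen := List.toFinset_card_of_nodup hnd
  simp [PySem.Set.len, ← hlen, hfin]

-- ===== VERDICT (by name: the statement is the Claim_ definition above) =====
theorem history_quality_score_py_spec : Claim_equal_history_quality_score_py := by
  intro items _
  unfold Spec_history_quality_score_py history_quality_score_py history_quality_score_py_alt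
  have hperm := PySem.List.sorted_perm (items.map pvNormRole) (fun r => r) false
  have hpair := PySem.List.sorted_pairwise (items.map pvNormRole) (fun r => r)
  have hfin : (PySem.List.sorted (items.map pvNormRole) (fun r => r) false).toFinset
      = (items.map pvNormRole).toFinset := by
    ext y; simp [hperm.mem_iff]
  simp only [pv_foldB, pv_assistant_count, pv_runCount_none _ hpair, hperm.count_eq,
    pv_set_len, hfin, zero_add]
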